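-- pv_equiv track=rewrite | github.com/Arseniy2001/KM | Lab 3/3.5.py | nul
-- ===== SOURCE A (Python) =====
-- def nul(p):
--     p1=[]
--     fl1=0
--     j=0
--     k=0
--     while fl1==0 and j<len(p):
--         if p[j]==0:
--             k+=1
--         else:
--             fl1=1
--         j+=1
--     for i in range(len(p)-k):
--         p1.append(p[i+k])
--     return(p1)
-- ===== SOURCE B (Python) =====
-- def nul(p):
--     out = []
--     started = False
--     for x in p:
--         if started or x != 0:
--             started = True
--             out.append(x)
--     return out
-- ===== Notes on version B (the rewrite author's own statement) =====
-- stated objective: simpler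
-- what changed: Replaces the two sequential passes (a flagged while-loop counting leading zeros, then an index-offset copy loop) with one traversal keeping a 'started' flag and appending once the first non-zero is seen.
import Mathlib
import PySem

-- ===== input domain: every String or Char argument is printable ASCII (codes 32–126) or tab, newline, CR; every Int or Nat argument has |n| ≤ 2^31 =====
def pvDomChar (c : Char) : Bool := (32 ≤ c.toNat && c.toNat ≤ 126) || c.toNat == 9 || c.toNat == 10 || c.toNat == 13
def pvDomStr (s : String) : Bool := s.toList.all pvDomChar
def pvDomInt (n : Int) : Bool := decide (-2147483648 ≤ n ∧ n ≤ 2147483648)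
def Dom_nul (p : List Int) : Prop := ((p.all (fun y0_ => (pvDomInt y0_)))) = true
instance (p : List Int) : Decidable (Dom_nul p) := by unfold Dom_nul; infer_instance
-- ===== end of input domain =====

-- B replaces A's two passes (flagged while-loop counting leading zeros, then an index-offset copy loop) by one traversal with a 'started' flag.

-- ===== PORT A =====
-- the while loop: state (fl1, j, k); runs while fl1 == 0 and j < len(p)
def nulWhile (p : List Int) (fl1 j k : Int) : Int × Int × Int :=
  if _h : fl1 = 0 ∧ j < (p.length : Int) then
    if (PySem.List.pyGet? p j).getD 0 = 0 then nulWhile p fl1 (j + 1) (k + 1)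
    else nulWhile p 1 (j + 1) k
  else (fl1, j, k)
termination_by ((p.length : Int) - j).toNat
decreasing_by all_goals omega

def nul (p : List Int) : List Int :=
  let k := (nulWhile p 0 0 0).2.2
  (PySem.List.pyRange 0 ((p.length : Int) - k) 1).foldl
    (fun p1 i => p1 ++ [(PySem.List.pyGet? p (i + k)).getD 0]) []

-- ===== PORT B =====
def nul_alt (p : List Int) : List Int :=
  (p.foldl (fun st x =>
      if st.1 || x != 0 then (true, st.2 ++ [x]) else st)
    (false, ([] : List Int))).2

-- ===== PRECONDITION & SPEC =====
def Spec_nul (p : List Int) (out : List Int) : Prop := out = nul_alt p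
instance (p : List Int) (out : List Int) : Decidable (Spec_nul p out) := by unfold Spec_nul; infer_instance

-- ===== CLAIM (what is proved, stated in full; the proofs are below) =====
def Claim_equal_nul : Prop := ∀ (p : List Int), Dom_nul p → Spec_nul p (nul p)

-- ===== LEMMAS AND PROOFS =====

-- B's fold, once started, appends everything
lemma alt_started (l : List Int) (acc : List Int) :
    l.foldl (fun st x => if st.1 || x != 0 then (true, st.2 ++ [x]) else st)
      (true, acc) = (true, acc ++ l) := by
  induction l generalizing acc with
  | nil => simp
  | cons x t ih =>
    rw [List.foldl_cons]
    have hstep : (if ((true, acc).1 || x != 0) = true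
        then (true, (true, acc).2 ++ [x]) else (true, acc)) = (true, acc ++ [x]) := by simp
    rw [hstep, ih]
    simp

-- B's result is dropWhile (· == 0)
lemma alt_eq_dropWhile (p : List Int) :
    nul_alt p = p.dropWhile (fun x => x == 0) := by
  unfold nul_alt
  induction p with
  | nil => simp
  | cons x t ih =>
    by_cases hx : x = 0
    · subst hx; simpa [List.dropWhile] using ih
    · rw [List.foldl_cons]
      have hstep : (if ((false, ([] : List Int)).1 || x != 0) = true
          then (true, (false, ([] : List Int)).2 ++ [x]) else (false, ([] : List Int)))
          = (true, [x]) := by simp [hx]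
      rw [hstep, alt_started]
      have hb : (x == 0) = false := by simp [hx]
      simp [List.dropWhile, hb]

-- the while loop's k counts the leading zeros of the suffix from j
lemma nulWhile_k (p : List Int) (j k : Int) (hj : 0 ≤ j) :
    (nulWhile p 0 j k).2.2
      = k + (((p.drop j.toNat).takeWhile (fun x => x == 0)).length : Int) := by
  by_cases h : j < (p.length : Int)
  · have hlt : j.toNat < p.length := by omega
    have hget : (PySem.List.pyGet? p j).getD 0 = p[j.toNat] := by
      simp [PySem.List.pyGet?, PySem.List.pyIdx?, hj, h]
    have hdrop : p.drop j.toNat = p[j.toNat] :: p.drop (j + 1).toNat := by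
      rw [List.drop_eq_getElem_cons hlt]
      congr 2; omega
    by_cases hz : p[j.toNat] = 0
    · rw [nulWhile, dif_pos ⟨rfl, h⟩, hget, if_pos hz,
        nulWhile_k p (j + 1) (k + 1) (by omega), hdrop]
      simp [List.takeWhile, hz]
      omega
    · rw [nulWhile, dif_pos ⟨rfl, h⟩, hget, if_neg hz, nulWhile,
        dif_neg (by simp), hdrop]
      have hb : (p[j.toNat] == 0) = false := by simp [hz]
      simp [List.takeWhile, hb]
  · rw [nulWhile, dif_neg (by omega), List.drop_eq_nil_of_le (by omega)]
    simp
termination_by ((p.length : Int) - j).toNat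
decreasing_by all_goals omega

-- the copy loop with offset k yields p.drop k
lemma copy_loop (p : List Int) (k : Nat) (hk : k ≤ p.length) :
    (PySem.List.pyRange 0 ((p.length : Int) - k) 1).foldl
      (fun p1 i => p1 ++ [(PySem.List.pyGet? p (i + k)).getD 0]) []
      = p.drop k := by
  rw [PySem.List.foldl_append_singleton_eq_map, List.nil_append]
  apply List.ext_getElem
  · simp [PySem.List.length_pyRange_one]
  · intro i h1 h2
    rw [List.getElem_map, PySem.List.getElem_pyRange_one]
    have hi : i < p.length - k := by
      simpa [PySem.List.length_pyRange_one] using h1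
    have hlen : ((0 : Int) + i + k) < (p.length : Int) := by
      push_cast; omega
    rw [show ((PySem.List.pyGet? p ((0 : Int) + i + k)).getD 0)
        = PySem.List.pyGetD p ((0 : Int) + i + k) 0 from rfl,
      PySem.List.pyGetD_eq_getElem p 0 (by positivity) hlen,
      List.getElem_drop]
    congr 1
    omega

lemma drop_takeWhile_length (p : List Int) :
    p.drop ((p.takeWhile (fun x => x == 0)).length) = p.dropWhile (fun x => x == 0) := by
  induction p with
  | nil => simp
  | cons x t ih =>
    by_cases hx : (x == 0) = true
    · simp [List.takeWhile, List.dropWhile, hx, ih]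
    · simp [List.takeWhile, List.dropWhile, hx]

-- ===== VERDICT (by name: the statement is the Claim_ definition above) =====
theorem nul_spec : Claim_equal_nul := by
  intro p _
  unfold Spec_nul
  have hk := nulWhile_k p 0 0 (le_refl 0)
  simp only [Int.toNat_zero, List.drop_zero, zero_add] at hk
  have hnul : nul p = (PySem.List.pyRange 0 ((p.length : Int) - (nulWhile p 0 0 0).2.2) 1).foldl
      (fun p1 i => p1 ++ [(PySem.List.pyGet? p (i + (nulWhile p 0 0 0).2.2)).getD 0]) [] := rfl
  rw [hnul, hk, copy_loop p _ ((List.takeWhile_sublist _).length_le),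
    drop_takeWhile_length, alt_eq_dropWhile]
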